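-- pv_equiv track=rewrite | github.com/Justin21523/elio-discord-bot | ai-service/app/services/response_cf.py | classify_response_style
-- ===== SOURCE A (Python) =====
-- from typing import Dict, List, Optional, Tuple, Any
--
-- def classify_response_style(response: str) -> Dict[str, str]:
--     """
--     Classify the style of a response.
--
--     Args:
--         response: The response text
--
--     Returns:
--         Dict of dimension -> detected style
--     """
--     styles = {}
--
--     # Length classification
--     word_count = len(response.split())
--     if word_count < 10:
--         styles['length'] = 'short'
--     elif word_count < 30:
--         styles['length'] = 'medium'
--     else:
--         styles['length'] = 'long'
--
--     # Structure classification
--     if response.endswith('?'):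
--         styles['structure'] = 'question'
--     elif response.endswith('!'):
--         styles['structure'] = 'exclamation'
--     elif '?' in response or '!' in response:
--         styles['structure'] = 'mixed'
--     else:
--         styles['structure'] = 'statement'
--
--     # Tone classification (simple heuristics)
--     lower = response.lower()
--     if any(w in lower for w in ['haha', 'lol', 'hehe', 'funny', 'joke']):
--         styles['tone'] = 'playful'
--     elif any(w in lower for w in ['love', 'care', 'heart', 'sweet', 'dear']):
--         styles['tone'] = 'warm'
--     elif any(w in lower for w in ['wow', 'amazing', 'awesome', 'excited']):
--         styles['tone'] = 'enthusiastic'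
--     elif any(w in lower for w in ['please', 'kindly', 'regarding', 'therefore']):
--         styles['tone'] = 'formal'
--     else:
--         styles['tone'] = 'casual'
--
--     # Topic classification (simple heuristics)
--     if any(w in lower for w in ['story', 'legend', 'ancient', 'history', 'realm']):
--         styles['topic'] = 'lore'
--     elif any(w in lower for w in ['haha', 'joke', 'funny', 'laugh']):
--         styles['topic'] = 'humor'
--     elif any(w in lower for w in ['should', 'try', 'suggest', 'recommend', 'advice']):
--         styles['topic'] = 'advice'
--     elif any(w in lower for w in ['feel', 'understand', 'sorry', 'hope', 'wish']):
--         styles['topic'] = 'empathy'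
--     elif any(w in lower for w in ['do', 'go', 'make', 'create', 'build']):
--         styles['topic'] = 'action'
--     else:
--         styles['topic'] = 'observation'
--
--     return styles
-- ===== SOURCE B (Python) =====
-- _LENGTH_LABELS = ('short', 'medium', 'long')
--
-- _TONE_GROUPS = [
--     ('playful', ['haha', 'lol', 'hehe', 'funny', 'joke']),
--     ('warm', ['love', 'care', 'heart', 'sweet', 'dear']),
--     ('enthusiastic', ['wow', 'amazing', 'awesome', 'excited']),
--     ('formal', ['please', 'kindly', 'regarding', 'therefore']),
-- ]
--
-- _TOPIC_GROUPS = [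
--     ('lore', ['story', 'legend', 'ancient', 'history', 'realm']),
--     ('humor', ['haha', 'joke', 'funny', 'laugh']),
--     ('advice', ['should', 'try', 'suggest', 'recommend', 'advice']),
--     ('empathy', ['feel', 'understand', 'sorry', 'hope', 'wish']),
--     ('action', ['do', 'go', 'make', 'create', 'build']),
-- ]
--
-- # flattened once at import time: every keyword paired with the rank of its group
-- _TONE_FLAT = [(kw, r) for r, (_, kws) in enumerate(_TONE_GROUPS) for kw in kws]
-- _TOPIC_FLAT = [(kw, r) for r, (_, kws) in enumerate(_TOPIC_GROUPS) for kw in kws]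
--
--
-- def _min_rank_label(flat, groups, low, default):
--     """Exhaustively scan ALL keywords; the answer is the label of the
--     lowest-ranked group that got any hit (min-reduction), else the default."""
--     hits = [r for kw, r in flat if kw in low]
--     return groups[min(hits)][0] if hits else default
--
--
-- def classify_response_style(response):
--     words = len(response.split())
--     length = _LENGTH_LABELS[(words >= 10) + (words >= 30)]
--     structure = {'?': 'question', '!': 'exclamation'}.get(response[-1:])
--     if structure is None:
--         structure = 'mixed' if ('?' in response or '!' in response) else 'statement'
--     low = response.lower()
--     return {
--         'length': length,
--         'structure': structure,
--         'tone': _min_rank_label(_TONE_FLAT, _TONE_GROUPS, low, 'casual'),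
--         'topic': _min_rank_label(_TOPIC_FLAT, _TOPIC_GROUPS, low, 'observation'),
--     }
-- ===== Notes on version B (the rewrite author's own statement) =====
-- stated objective: alternative
-- what changed: Tone/topic are no longer found by short-circuiting if/elif cascades: B flattens the keyword groups into one (keyword, rank) table built at import time, exhaustively collects the ranks of ALL substring hits and reduces them with min() to pick the label; length becomes an arithmetic table index (words>=10)+(words>=30) and structure a last-character dict lookup with a fallback.
import Mathlib
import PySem

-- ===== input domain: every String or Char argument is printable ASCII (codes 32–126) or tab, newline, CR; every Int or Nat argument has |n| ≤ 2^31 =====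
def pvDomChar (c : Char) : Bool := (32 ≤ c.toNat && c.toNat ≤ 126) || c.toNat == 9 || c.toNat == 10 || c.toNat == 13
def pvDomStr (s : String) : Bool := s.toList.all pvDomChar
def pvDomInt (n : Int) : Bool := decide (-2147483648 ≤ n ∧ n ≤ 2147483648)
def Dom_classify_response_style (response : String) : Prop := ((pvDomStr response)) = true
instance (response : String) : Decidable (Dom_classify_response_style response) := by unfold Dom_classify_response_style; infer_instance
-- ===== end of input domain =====

-- B replaces A's short-circuiting tone/topic if/elif cascades by a flattened (keyword, rank)
-- table scanned exhaustively with a min-rank reduction, an arithmetic table index for length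
-- and a last-character dict lookup for structure (objective: alternative); values are identical.

-- ===== PORT A =====
def classify_response_style (response : String) : List (String × String) :=
  let styles : PySem.Dict String String := PySem.Dict.empty
  let word_count := (PySem.Str.split₀ response).length
  let styles :=
    if word_count < 10 then styles.insert "length" "short"
    else if word_count < 30 then styles.insert "length" "medium"
    else styles.insert "length" "long"
  let styles :=
    if PySem.Str.endswith response "?" then styles.insert "structure" "question"
    else if PySem.Str.endswith response "!" then styles.insert "structure" "exclamation"
    else if PySem.Str.isIn "?" response || PySem.Str.isIn "!" response then styles.insert "structure" "mixed"
    else styles.insert "structure" "statement"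
  let lower := PySem.Str.lower response
  let styles :=
    if (["haha", "lol", "hehe", "funny", "joke"]).any (fun w => PySem.Str.isIn w lower) then styles.insert "tone" "playful"
    else if (["love", "care", "heart", "sweet", "dear"]).any (fun w => PySem.Str.isIn w lower) then styles.insert "tone" "warm"
    else if (["wow", "amazing", "awesome", "excited"]).any (fun w => PySem.Str.isIn w lower) then styles.insert "tone" "enthusiastic"
    else if (["please", "kindly", "regarding", "therefore"]).any (fun w => PySem.Str.isIn w lower) then styles.insert "tone" "formal"
    else styles.insert "tone" "casual"
  let styles :=
    if (["story", "legend", "ancient", "history", "realm"]).any (fun w => PySem.Str.isIn w lower) then styles.insert "topic" "lore"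
    else if (["haha", "joke", "funny", "laugh"]).any (fun w => PySem.Str.isIn w lower) then styles.insert "topic" "humor"
    else if (["should", "try", "suggest", "recommend", "advice"]).any (fun w => PySem.Str.isIn w lower) then styles.insert "topic" "advice"
    else if (["feel", "understand", "sorry", "hope", "wish"]).any (fun w => PySem.Str.isIn w lower) then styles.insert "topic" "empathy"
    else if (["do", "go", "make", "create", "build"]).any (fun w => PySem.Str.isIn w lower) then styles.insert "topic" "action"
    else styles.insert "topic" "observation"
  styles.items

-- ===== PORT B =====
def pvLengthLabels : List String := ["short", "medium", "long"]

def pvToneGroups : List (String × List String) :=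
  [("playful", ["haha", "lol", "hehe", "funny", "joke"]),
   ("warm", ["love", "care", "heart", "sweet", "dear"]),
   ("enthusiastic", ["wow", "amazing", "awesome", "excited"]),
   ("formal", ["please", "kindly", "regarding", "therefore"])]

def pvTopicGroups : List (String × List String) :=
  [("lore", ["story", "legend", "ancient", "history", "realm"]),
   ("humor", ["haha", "joke", "funny", "laugh"]),
   ("advice", ["should", "try", "suggest", "recommend", "advice"]),
   ("empathy", ["feel", "understand", "sorry", "hope", "wish"]),
   ("action", ["do", "go", "make", "create", "build"])]

-- Source B's import-time flattening comprehension: every keyword paired with its group's rank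
def pvFlat (r : Nat) : List (String × List String) → List (String × Nat)
  | [] => []
  | (_, kws) :: rest => kws.map (fun kw => (kw, r)) ++ pvFlat (r + 1) rest

def pvToneFlat : List (String × Nat) := pvFlat 0 pvToneGroups
def pvTopicFlat : List (String × Nat) := pvFlat 0 pvTopicGroups

-- _min_rank_label: collect the ranks of ALL substring hits, reduce with min()
-- (the pyGetD default is unreachable: min(hits) is always < groups.length)
def pvMinRankLabel (flat : List (String × Nat)) (groups : List (String × List String))
    (low default : String) : String :=
  let hits : List Nat := (flat.filter (fun p => PySem.Str.isIn p.1 low)).map (·.2)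
  match PySem.List.min? hits (fun x => x) with
  | none => default
  | some r => (PySem.List.pyGetD groups (r : Int) ("", [])).1

def classify_response_style_alt (response : String) : List (String × String) :=
  let words := (PySem.Str.split₀ response).length
  let lengthIdx : Nat := (if 10 ≤ words then 1 else 0) + (if 30 ≤ words then 1 else 0)
  -- pyGetD default unreachable: lengthIdx ≤ 2
  let length := PySem.List.pyGetD pvLengthLabels (lengthIdx : Int) ""
  -- {'?': 'question', '!': 'exclamation'}.get(response[-1:]), with the mixed/statement fallback
  let struct_ :=
    ((PySem.Dict.ofList [("?", "question"), ("!", "exclamation")]).get?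
        (PySem.Str.slice response (some (-1)) none)).getD
      (if PySem.Str.isIn "?" response || PySem.Str.isIn "!" response then "mixed" else "statement")
  let low := PySem.Str.lower response
  [("length", length), ("structure", struct_),
   ("tone", pvMinRankLabel pvToneFlat pvToneGroups low "casual"),
   ("topic", pvMinRankLabel pvTopicFlat pvTopicGroups low "observation")]

-- ===== PRECONDITION & SPEC =====
def Spec_classify_response_style (response : String) (out : List (String × String)) : Prop := out = classify_response_style_alt response
instance (response : String) (out : List (String × String)) : Decidable (Spec_classify_response_style response out) := by unfold Spec_classify_response_style; infer_instance

-- ===== CLAIM (what is proved, stated in full; the proofs are below) =====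
def Claim_equal_classify_response_style : Prop := ∀ (response : String), Dom_classify_response_style response → Spec_classify_response_style response (classify_response_style response)

-- ===== LEMMAS AND PROOFS =====

-- A's if/elif cascade, as a proof-side recursive characterisation
def pvCascade (low default : String) : List (String × List String) → String
  | [] => default
  | (lab, kws) :: rest =>
      if kws.any (fun w => PySem.Str.isIn w low) then lab else pvCascade low default rest

-- index of the first group with a substring hit
def pvFirstHit (low : String) : List (String × List String) → Option Nat
  | [] => none
  | (_, kws) :: rest =>
      if kws.any (fun w => PySem.Str.isIn w low) then some 0
      else (pvFirstHit low rest).map (· + 1)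

-- every rank recorded in pvFlat j groups is at least j
theorem pv_flat_rank_ge (groups : List (String × List String)) :
    ∀ (j : Nat) (x : String × Nat), x ∈ pvFlat j groups → j ≤ x.2 := by
  induction groups with
  | nil => intro j x hx; simp [pvFlat] at hx
  | cons g rest ih =>
      intro j x hx
      obtain ⟨lab, kws⟩ := g
      simp only [pvFlat, List.mem_append, List.mem_map] at hx
      rcases hx with ⟨kw, _, rfl⟩ | hx
      · exact le_refl j
      · exact le_trans (Nat.le_succ j) (ih (j + 1) x hx)

-- the min of the hit ranks is the index of the first group with a hit (shifted by the start rank)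
theorem pv_min_hits_eq (low : String) (groups : List (String × List String)) :
    ∀ k : Nat,
      PySem.List.min? (((pvFlat k groups).filter (fun p => PySem.Str.isIn p.1 low)).map (·.2))
          (fun x => x)
        = (pvFirstHit low groups).map (· + k) := by
  induction groups with
  | nil => intro k; rfl
  | cons g rest ih =>
      intro k
      obtain ⟨lab, kws⟩ := g
      simp only [pvFlat, pvFirstHit, List.filter_append, List.map_append]
      rw [List.filter_map, List.map_map]
      have hpred : ((fun p => PySem.Str.isIn p.1 low) ∘ (fun kw => (kw, k)))
          = (fun w => PySem.Str.isIn w low) := rfl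
      rw [hpred]
      by_cases hq : kws.any (fun w => PySem.Str.isIn w low) = true
      · simp only [hq, if_true]
        obtain ⟨w, hwmem, hw⟩ := List.any_eq_true.mp hq
        have hkmem : k ∈ (kws.filter (fun w => PySem.Str.isIn w low)).map
              ((fun p => p.2) ∘ (fun kw => (kw, k))) ++
            ((pvFlat (k + 1) rest).filter (fun p => PySem.Str.isIn p.1 low)).map (·.2) := by
          refine List.mem_append_left _ ?_
          exact List.mem_map.mpr ⟨w, List.mem_filter.mpr ⟨hwmem, hw⟩, rfl⟩
        set hits := (kws.filter (fun w => PySem.Str.isIn w low)).map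
              ((fun p => p.2) ∘ (fun kw => (kw, k))) ++
            ((pvFlat (k + 1) rest).filter (fun p => PySem.Str.isIn p.1 low)).map (·.2) with hhits
        obtain ⟨m, hm⟩ : ∃ m, PySem.List.min? hits (fun x => x) = some m := by
          cases h : PySem.List.min? hits (fun x => x) with
          | none =>
              exact absurd ((PySem.List.min?_eq_none_iff hits _).mp h)
                (by intro hnil; rw [hnil] at hkmem; simp at hkmem)
          | some m => exact ⟨m, rfl⟩
        have h1 : m ≤ k := PySem.List.min?_isMin hm k hkmem
        have h2 : k ≤ m := by
          have hmmem := PySem.List.min?_mem hm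
          rw [hhits] at hmmem
          rcases List.mem_append.mp hmmem with hl | hr
          · obtain ⟨w', _, rfl⟩ := List.mem_map.mp hl; exact le_refl k
          · obtain ⟨p, hp, rfl⟩ := List.mem_map.mp hr
            exact le_trans (Nat.le_succ k)
              (pv_flat_rank_ge rest (k + 1) p (List.mem_filter.mp hp).1)
        rw [hm]
        simp
        omega
      · simp only [hq]
        have hfil : kws.filter (fun w => PySem.Str.isIn w low) = [] :=
          List.filter_eq_nil_iff.mpr (by
            intro a ha
            have := List.any_eq_false.mp (Bool.eq_false_iff.mpr hq) a ha
            simpa using this)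
        rw [hfil]
        simp only [List.map_nil, List.nil_append]
        rw [ih (k + 1)]
        cases pvFirstHit low rest with
        | none => rfl
        | some i => simp; omega

-- looking the first-hit index back up in the groups list gives exactly the cascade's answer
theorem pv_lookup_firstHit (low default : String) (groups : List (String × List String)) :
    (match pvFirstHit low groups with
     | none => default
     | some r => (PySem.List.pyGetD groups (r : Int) ("", [])).1)
      = pvCascade low default groups := by
  induction groups with
  | nil => rfl
  | cons g rest ih =>
      obtain ⟨lab, kws⟩ := g
      simp only [pvFirstHit, pvCascade]
      by_cases hq : kws.any (fun w => PySem.Str.isIn w low) = true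
      · simp only [hq, if_true, PySem.List.pyGetD_natCast, List.getD_cons_zero]
      · simp only [hq]
        rw [← ih]
        cases pvFirstHit low rest with
        | none => rfl
        | some i =>
            show (PySem.List.pyGetD ((lab, kws) :: rest) (((i + 1 : Nat)) : Int) ("", [])).1
              = (PySem.List.pyGetD rest ((i : Nat) : Int) ("", [])).1
            simp only [PySem.List.pyGetD_natCast, List.getD_cons_succ]

theorem pv_minRankLabel_eq (groups : List (String × List String)) (low default : String) :
    pvMinRankLabel (pvFlat 0 groups) groups low default = pvCascade low default groups := by
  have h := pv_min_hits_eq low groups 0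
  have h0 : (pvFirstHit low groups).map (· + 0) = pvFirstHit low groups := by
    cases pvFirstHit low groups <;> simp
  rw [h0] at h
  show (match PySem.List.min?
        (((pvFlat 0 groups).filter (fun p => PySem.Str.isIn p.1 low)).map (·.2)) (fun x => x) with
      | none => default
      | some r => (PySem.List.pyGetD groups (r : Int) ("", [])).1) = _
  rw [h]
  exact pv_lookup_firstHit low default groups

-- a one-character list is a suffix exactly when it is the last-index drop
theorem pv_suffix_single (cs : List Char) (c : Char) :
    [c] <:+ cs ↔ cs.drop (cs.length - 1) = [c] := by
  constructor
  · rintro ⟨t, rfl⟩; simp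
  · intro h; exact ⟨cs.take (cs.length - 1), by rw [← h, List.take_append_drop]⟩

-- the structure component: last-character dict lookup = endswith cascade
theorem pv_struct_eq (response F : String) :
    ((PySem.Dict.ofList [("?", "question"), ("!", "exclamation")]).get?
        (PySem.Str.slice response (some (-1)) none)).getD F
      = (if PySem.Str.endswith response "?" then "question"
         else if PySem.Str.endswith response "!" then "exclamation"
         else F) := by
  have hget : ∀ key : String,
      (PySem.Dict.ofList [("?", "question"), ("!", "exclamation")]).get? key
        = (if "?" == key then some "question"
           else if "!" == key then some "exclamation" else none) := by
    intro key
    simp only [show PySem.Dict.ofList [("?", "question"), ("!", "exclamation")]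
        = PySem.Dict.mk [("?", "question"), ("!", "exclamation")] from rfl,
      PySem.Dict.get?_mk_cons]
    rfl
  rw [hget]
  have hkey : (PySem.Str.slice response (some (-1)) none).toList
      = response.toList.drop (response.toList.length - 1) := by
    simp [pysem, PySem.List.slice_from_neg_one]
  have hc : ∀ (c : Char) (lit : String), lit.toList = [c] →
      ((lit == PySem.Str.slice response (some (-1)) none)
        = PySem.Str.endswith response lit) := by
    intro c lit hlit
    rw [Bool.eq_iff_iff, beq_iff_eq]
    constructor
    · intro he
      have h1 : (PySem.Str.slice response (some (-1)) none).toList = [c] := by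
        rw [← he, hlit]
      rw [hkey] at h1
      have hsuf := (pv_suffix_single _ c).mpr h1
      simpa [PySem.Chars.endswith_iff, hlit] using hsuf
    · intro he
      have hsuf : [c] <:+ response.toList := by
        simpa [PySem.Chars.endswith_iff, hlit] using he
      apply String.toList_inj.mp
      rw [hlit, hkey]
      exact ((pv_suffix_single _ c).mp hsuf).symm
  rw [hc '?' "?" (by simp), hc '!' "!" (by simp)]
  split_ifs <;> rfl

-- the length component: arithmetic table index = threshold cascade
theorem pv_length_eq (words : Nat) :
    PySem.List.pyGetD pvLengthLabels
        (((if 10 ≤ words then 1 else 0) + (if 30 ≤ words then 1 else 0) : Nat) : Int) ""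
      = (if words < 10 then "short" else if words < 30 then "medium" else "long") := by
  rcases Nat.lt_or_ge words 10 with h | h
  · have h10 : ¬ 10 ≤ words := by omega
    have h30 : ¬ 30 ≤ words := by omega
    simp only [if_neg h10, if_neg h30, if_pos h]
    rfl
  · rcases Nat.lt_or_ge words 30 with h' | h'
    · have h30 : ¬ 30 ≤ words := by omega
      have hn10 : ¬ words < 10 := by omega
      simp only [if_pos h, if_neg h30, if_neg hn10, if_pos h']
      rfl
    · have hn10 : ¬ words < 10 := by omega
      have hn30 : ¬ words < 30 := by omega
      simp only [if_pos h, if_pos h', if_neg hn10, if_neg hn30]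
      rfl

-- an if/elif cascade that inserts different values at the same key is one insert of an if-chain
theorem pv_ite_insert {c : Prop} [Decidable c] (d : PySem.Dict String String) (k v w : String) :
    (if c then d.insert k v else d.insert k w) = d.insert k (if c then v else w) := by
  split <;> rfl

-- items of the four-key insert chain A builds (keys are distinct literals)
theorem pv_items_four (a b c d : String) :
    ((((PySem.Dict.empty.insert "length" a).insert "structure" b).insert "tone" c).insert
        "topic" d).items = [("length", a), ("structure", b), ("tone", c), ("topic", d)] := rfl

-- ===== VERDICT (by name: the statement is the Claim_ definition above) =====
theorem classify_response_style_spec : Claim_equal_classify_response_style := by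
  intro response _
  show classify_response_style response = classify_response_style_alt response
  simp only [classify_response_style, classify_response_style_alt, pv_ite_insert, pv_items_four,
    pvToneFlat, pvTopicFlat, pv_minRankLabel_eq, pv_struct_eq, pv_length_eq]
  simp [pvCascade, pvToneGroups, pvTopicGroups]
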